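-- pv_equiv track=rewrite | github.com/yubinbai/pcuva-problems | 10252 - Common Permutation/common-permutation.py | commonPermutation
-- ===== SOURCE A (Python) =====
-- import collections
--
-- def commonPermutation(s1, s2):
--     c1 = collections.Counter(s1)
--     c2 = collections.Counter(s2)
--
--     p = {}
--     for i in c1:
--         if i in c2:
--             if c1[i] < c2[i]:
--                 p[i] = c1[i]
--             else:
--                 p[i] = c2[i]
--
--     result = []
--     for i in p:
--         result.append(i * p[i])
--     result.sort()
--     return ''.join(result)
-- ===== SOURCE B (Python) =====
-- def commonPermutation(s1, s2):
--     a = sorted(s1)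
--     b = sorted(s2)
--     i = j = 0
--     out = []
--     while i < len(a) and j < len(b):
--         if a[i] == b[j]:
--             out.append(a[i])
--             i += 1
--             j += 1
--         elif a[i] < b[j]:
--             i += 1
--         else:
--             j += 1
--     return ''.join(out)
-- ===== Notes on version B (the rewrite author's own statement) =====
-- stated objective: alternative
-- what changed: Replaces the Counter/dict of min-counts plus a sort of per-character group strings with sorting both strings once and doing a two-pointer merge that emits each common character directly in order.
import Mathlib
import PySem

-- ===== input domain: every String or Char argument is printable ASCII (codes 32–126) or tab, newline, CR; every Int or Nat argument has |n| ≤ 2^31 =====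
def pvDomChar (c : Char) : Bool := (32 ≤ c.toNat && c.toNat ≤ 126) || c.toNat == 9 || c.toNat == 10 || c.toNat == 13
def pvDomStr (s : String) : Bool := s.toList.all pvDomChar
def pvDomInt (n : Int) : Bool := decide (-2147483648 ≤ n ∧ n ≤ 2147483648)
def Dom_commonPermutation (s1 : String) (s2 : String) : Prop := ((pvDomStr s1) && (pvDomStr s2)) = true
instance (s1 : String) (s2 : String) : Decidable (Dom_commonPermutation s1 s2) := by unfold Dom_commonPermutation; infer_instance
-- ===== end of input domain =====

-- B replaces the Counter/min-count dict + sort-of-group-strings of A by sorting both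
-- strings once and merging them with two pointers, emitting common characters in order
-- (objective: alternative algorithm, same result).

-- ===== PORT A =====
def commonPermutation (s1 : String) (s2 : String) : String :=
  let c1 := PySem.Dict.counter s1.toList
  let c2 := PySem.Dict.counter s2.toList
  let p := c1.keys.foldl (fun p i =>
    if c2.contains i then
      if c1.getD i 0 < c2.getD i 0 then p.insert i (c1.getD i 0)
      else p.insert i (c2.getD i 0)
    else p) PySem.Dict.empty
  let result := p.keys.foldl
    (fun r i => r ++ [List.replicate (p.getD i 0).toNat i]) ([] : List (List Char))
  let result := PySem.List.sorted result (fun x => x) false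
  String.mk (PySem.Chars.join [] result)

-- ===== PORT B =====
-- the two-pointer while loop of Source B, consuming the sorted lists from the front
def pvMerge : List Char → List Char → List Char
  | x :: xs, y :: ys =>
    if x = y then x :: pvMerge xs ys
    else if x < y then pvMerge xs (y :: ys)
    else pvMerge (x :: xs) ys
  | _, _ => []
termination_by a b => a.length + b.length
decreasing_by all_goals simp <;> omega

def commonPermutation_alt (s1 : String) (s2 : String) : String :=
  String.mk (pvMerge (PySem.List.sorted s1.toList (fun x => x) false)
                     (PySem.List.sorted s2.toList (fun x => x) false))

-- ===== PRECONDITION & SPEC =====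
def Spec_commonPermutation (s1 : String) (s2 : String) (out : String) : Prop := out = commonPermutation_alt s1 s2
instance (s1 : String) (s2 : String) (out : String) : Decidable (Spec_commonPermutation s1 s2 out) := by unfold Spec_commonPermutation; infer_instance

-- ===== CLAIM (what is proved, stated in full; the proofs are below) =====
def Claim_equal_commonPermutation : Prop := ∀ (s1 : String) (s2 : String), Dom_commonPermutation s1 s2 → Spec_commonPermutation s1 s2 (commonPermutation s1 s2)

-- ===== LEMMAS AND PROOFS =====

-- every character of the merge lies in both inputs
theorem mem_pvMerge : ∀ (a b : List Char) (c : Char), c ∈ pvMerge a b → c ∈ a ∧ c ∈ b := by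
  intro a
  induction a with
  | nil => intro b c hc; simp [pvMerge] at hc
  | cons x xs iha =>
    intro b
    induction b with
    | nil => intro c hc; simp [pvMerge] at hc
    | cons y ys ihb =>
      intro c hc
      simp only [pvMerge] at hc
      by_cases hxy : x = y
      · rw [if_pos hxy] at hc
        rcases List.mem_cons.mp hc with rfl | hc
        · exact ⟨List.mem_cons_self, hxy ▸ List.mem_cons_self⟩
        · obtain ⟨h1, h2⟩ := iha ys c hc
          exact ⟨List.mem_cons_of_mem _ h1, List.mem_cons_of_mem _ h2⟩
      · rw [if_neg hxy] at hc
        by_cases hlt : x < y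
        · rw [if_pos hlt] at hc
          obtain ⟨h1, h2⟩ := iha (y :: ys) c hc
          exact ⟨List.mem_cons_of_mem _ h1, h2⟩
        · rw [if_neg hlt] at hc
          obtain ⟨h1, h2⟩ := ihb c hc
          exact ⟨h1, List.mem_cons_of_mem _ h2⟩

-- merge of two ≤-sorted lists is ≤-sorted
theorem pvMerge_pairwise : ∀ (a b : List Char),
    a.Pairwise (· ≤ ·) → b.Pairwise (· ≤ ·) → (pvMerge a b).Pairwise (· ≤ ·) := by
  intro a
  induction a with
  | nil => intro b _ _; simp [pvMerge]
  | cons x xs iha =>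
    intro b
    induction b with
    | nil => intro _ _; simp [pvMerge]
    | cons y ys ihb =>
      intro ha hb
      simp only [pvMerge]
      by_cases hxy : x = y
      · rw [if_pos hxy]
        refine List.pairwise_cons.mpr
          ⟨?_, iha ys (List.pairwise_cons.mp ha).2 (List.pairwise_cons.mp hb).2⟩
        intro z hz
        exact (List.pairwise_cons.mp ha).1 z (mem_pvMerge xs ys z hz).1
      · rw [if_neg hxy]
        by_cases hlt : x < y
        · rw [if_pos hlt]
          exact iha (y :: ys) (List.pairwise_cons.mp ha).2 hb
        · rw [if_neg hlt]
          exact ihb ha (List.pairwise_cons.mp hb).2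

-- on sorted lists the merge realises the multiset minimum, count by count
-- a character smaller than the head of a sorted list does not occur in it
theorem count_zero_of_lt_head {x y : Char} {ys : List Char}
    (hb : (y :: ys).Pairwise (· ≤ ·)) (h : x < y) : (y :: ys).count x = 0 := by
  refine List.count_eq_zero.mpr ?_
  intro hmem
  rcases List.mem_cons.mp hmem with rfl | hmem
  · exact absurd h (lt_irrefl x)
  · exact absurd (lt_of_lt_of_le h ((List.pairwise_cons.mp hb).1 x hmem)) (lt_irrefl x)

theorem pvMerge_count : ∀ (a b : List Char), a.Pairwise (· ≤ ·) → b.Pairwise (· ≤ ·) →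
    ∀ c, (pvMerge a b).count c = min (a.count c) (b.count c) := by
  intro a
  induction a with
  | nil => intro b _ _ c; simp [pvMerge]
  | cons x xs iha =>
    intro b
    induction b with
    | nil => intro _ _ c; simp [pvMerge]
    | cons y ys ihb =>
      intro ha hb c
      simp only [pvMerge]
      by_cases hxy : x = y
      · rw [if_pos hxy]
        subst hxy
        have hrec := iha ys (List.pairwise_cons.mp ha).2 (List.pairwise_cons.mp hb).2 c
        by_cases hcx : c = x
        · subst hcx
          simp [hrec]
        · simp [hrec, Ne.symm hcx]
      · rw [if_neg hxy]
        by_cases hlt : x < y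
        · rw [if_pos hlt]
          have hrec := iha (y :: ys) (List.pairwise_cons.mp ha).2 hb c
          by_cases hcx : c = x
          · subst hcx
            have h0 : (y :: ys).count c = 0 := count_zero_of_lt_head hb hlt
            simp [hrec, h0]
          · simp [hrec, Ne.symm hcx]
        · rw [if_neg hlt]
          have hrec := ihb ha (List.pairwise_cons.mp hb).2 c
          by_cases hcy : c = y
          · subst hcy
            have hyx : c < x := lt_of_le_of_ne (not_lt.mp hlt) fun h => hxy h.symm
            have h0 : (x :: xs).count c = 0 := count_zero_of_lt_head ha hyx
            simp [hrec, h0]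
          · simp [hrec, Ne.symm hcy]

-- ''.join with empty separator is flatten
theorem join_nil_eq_flatten : ∀ (L : List (List Char)), PySem.Chars.join [] L = L.flatten := by
  intro L
  induction L with
  | nil => simp [PySem.Chars.join, List.intercalate]
  | cons a L ih =>
    cases L with
    | nil => simp [PySem.Chars.join, List.intercalate]
    | cons b L =>
      simp only [PySem.Chars.join, List.intercalate] at ih ⊢
      simp only [List.intersperse_cons₂, List.flatten_cons, List.flatten_cons] at ih ⊢
      simp [ih]

-- A's conditional-insert loop over fresh distinct keys, as an items list
theorem foldl_cond_insert_items (P : Char → Bool) (v : Char → Int) :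
    ∀ (ks : List Char) (d : PySem.Dict Char Int), ks.Nodup →
      (∀ k ∈ ks, d.contains k = false) →
      (ks.foldl (fun d i => if P i then d.insert i (v i) else d) d).items
        = d.items ++ (ks.filter P).map (fun k => (k, v k)) := by
  intro ks
  induction ks with
  | nil => intro d _ _; simp
  | cons k ks ih =>
    intro d hnd hfresh
    obtain ⟨hk, hnd'⟩ := List.nodup_cons.mp hnd
    by_cases hp : P k
    · have hins : ∀ k' ∈ ks, (d.insert k (v k)).contains k' = false := by
        intro k' hk'
        rw [PySem.Dict.contains_insert]
        have hne : k' ≠ k := fun h => hk (h ▸ hk')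
        simp [hne, hfresh k' (List.mem_cons_of_mem _ hk')]
      have := ih (d.insert k (v k)) hnd' hins
      simp only [List.foldl_cons, hp, if_pos, this,
        PySem.Dict.items_insert_of_not_contains d (v k) (hfresh k List.mem_cons_self)]
      simp [hp]
    · rw [List.foldl_cons, if_neg hp,
        ih d hnd' (fun k' hk' => hfresh k' (List.mem_cons_of_mem _ hk'))]
      simp [hp]

-- counting inside a flatten of replicate-groups over distinct keys
theorem count_flatten_replicate (f : Char → Nat) (c : Char) :
    ∀ (ks : List Char), ks.Nodup →
      ((ks.map (fun k => List.replicate (f k) k)).flatten).count c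
        = if c ∈ ks then f c else 0 := by
  intro ks
  induction ks with
  | nil => intro _; simp
  | cons k ks ih =>
    intro hnd
    obtain ⟨hk, hnd'⟩ := List.nodup_cons.mp hnd
    simp only [List.map_cons, List.flatten_cons, List.count_append, List.count_replicate,
      ih hnd', List.mem_cons]
    by_cases hck : c = k
    · subst hck
      simp [hk]
    · simp [hck, Ne.symm hck]

-- lexicographic ≤ on nonempty lists bounds the heads
theorem head_le_of_cons_le {x y : Char} {u v : List Char} (h : x :: u ≤ y :: v) : x ≤ y := by
  by_contra hc
  rw [not_le] at hc
  exact absurd h (not_le.mpr (List.Lex.rel hc))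

-- both sides produce the ≤-sorted list whose count at c is min of the two counts; hence equal
theorem commonPermutation_eq (s1 s2 : String) :
    commonPermutation s1 s2 = commonPermutation_alt s1 s2 := by
  simp only [commonPermutation, commonPermutation_alt]
  refine congrArg String.mk ?_
  set l1 := s1.toList with hl1
  set l2 := s2.toList with hl2
  set P : Char → Bool := fun i => (PySem.Dict.counter l2).contains i with hP
  set v : Char → Int := fun i =>
    if (PySem.Dict.counter l1).getD i 0 < (PySem.Dict.counter l2).getD i 0 then
      (PySem.Dict.counter l1).getD i 0
    else (PySem.Dict.counter l2).getD i 0 with hv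
  have hstep : (fun (p : PySem.Dict Char Int) i =>
      if (PySem.Dict.counter l2).contains i then
        if (PySem.Dict.counter l1).getD i 0 < (PySem.Dict.counter l2).getD i 0 then
          p.insert i ((PySem.Dict.counter l1).getD i 0)
        else p.insert i ((PySem.Dict.counter l2).getD i 0)
      else p)
      = fun (p : PySem.Dict Char Int) i => if P i then p.insert i (v i) else p := by
    funext p i
    by_cases h : P i
    · have h' : (PySem.Dict.counter l2).contains i = true := by simpa [hP] using h
      rw [if_pos h', if_pos h]
      simp only [hv]
      split_ifs <;> rfl
    · have h' : ¬(PySem.Dict.counter l2).contains i = true := by simpa [hP] using h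
      rw [if_neg h', if_neg h]
  rw [hstep, PySem.Dict.keys_counter]
  set ks := PySem.Set.ofList l1 with hks
  have hndks : List.Nodup ks := PySem.Set.nodup_ofList l1
  set p := ks.foldl (fun p i => if P i then p.insert i (v i) else p) PySem.Dict.empty with hpdef
  have hfresh : ∀ k ∈ ks, (PySem.Dict.empty : PySem.Dict Char Int).contains k = false := by
    intro k _
    exact PySem.Dict.contains_empty k
  have hitems : p.items = (ks.filter P).map (fun k => (k, v k)) := by
    rw [hpdef, foldl_cond_insert_items P v ks _ hndks hfresh]
    rfl
  set ksP := ks.filter P with hksP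
  have hndP : ksP.Nodup := hndks.filter _
  have hkeysp : p.keys = ksP := by
    simp only [PySem.Dict.keys, hitems, List.map_map]
    exact List.map_id ksP
  have hgetD : ∀ k ∈ ksP, p.getD k 0 = v k := by
    intro k hk
    exact PySem.Dict.getD_of_mem_items p
      (by rw [hitems]; exact List.mem_map.mpr ⟨k, hk, rfl⟩)
      (by rw [hkeysp]; exact hndP) 0
  rw [PySem.List.foldl_append_singleton_eq_map, hkeysp, List.nil_append]
  have hvk : ∀ k ∈ ksP, (v k).toNat = min (l1.count k) (l2.count k) := by
    intro k _
    have : v k = ((min (l1.count k) (l2.count k) : Nat) : Int) := by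
      simp only [hv, PySem.Dict.getD_counter]
      split_ifs with h <;> push_cast at h ⊢ <;> omega
    rw [this, Int.toNat_natCast]
  have hmap : ksP.map (fun i => List.replicate (p.getD i 0).toNat i)
      = ksP.map (fun k => List.replicate (min (l1.count k) (l2.count k)) k) := by
    apply List.map_congr_left
    intro k hk
    rw [hgetD k hk, hvk k hk]
  rw [hmap]
  set gs := ksP.map (fun k => List.replicate (min (l1.count k) (l2.count k)) k) with hgs
  -- the port's `sorted` call on List Char elaborates with core's LT/Decidable instances;
  -- rewrite it to the LinearOrder instances the order lemmas are stated with (same booleans)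
  have hsorted_eq :
      @PySem.List.sorted (List Char) (List Char) List.instLT (fun a b => a.decidableLT b)
        gs (fun x => x) false
      = @PySem.List.sorted (List Char) (List Char) List.instLinearOrder.toLT
          LinearOrder.toDecidableLT gs (fun x => x) false := by
    rw [@PySem.List.sorted_eq_foldl_insertBy (List Char) (List Char) List.instLT
        (fun a b => a.decidableLT b) gs (fun x => x),
      @PySem.List.sorted_eq_foldl_insertBy (List Char) (List Char) List.instLinearOrder.toLT
        LinearOrder.toDecidableLT gs (fun x => x)]
    congr 1
    funext acc x
    congr 1
    funext a b
    refine decide_eq_decide.mpr ?_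
    constructor
    · intro h
      exact (List.lt_iff_lex_lt a b).mp h
    · intro h
      exact (List.lt_iff_lex_lt a b).mpr h
  rw [hsorted_eq, join_nil_eq_flatten]
  -- membership in ksP = occurring in both strings
  have hmemP : ∀ c : Char, c ∈ ksP ↔ c ∈ l1 ∧ c ∈ l2 := by
    intro c
    rw [hksP, List.mem_filter]
    simp only [hks, PySem.Set.mem_ofList, hP, PySem.Dict.contains_counter]
    simp
  -- intersection counts are positive on ksP
  have hpos : ∀ k ∈ ksP, 0 < min (l1.count k) (l2.count k) := by
    intro k hk
    obtain ⟨h1, h2⟩ := (hmemP k).mp hk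
    exact lt_min (List.count_pos_iff.mpr h1) (List.count_pos_iff.mpr h2)
  have hs1 := PySem.List.sorted_pairwise l1 (fun x => x)
  have hs2 := PySem.List.sorted_pairwise l2 (fun x => x)
  -- the merge side is sorted
  have hsB : (pvMerge (PySem.List.sorted l1 (fun x => x) false)
      (PySem.List.sorted l2 (fun x => x) false)).Pairwise (· ≤ ·) :=
    pvMerge_pairwise _ _ hs1 hs2
  -- the flattened-groups side is sorted
  have hsA : ((@PySem.List.sorted (List Char) (List Char) List.instLinearOrder.toLT
      LinearOrder.toDecidableLT gs (fun x => x) false).flatten).Pairwise (· ≤ ·) := by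
    refine List.pairwise_flatten.mpr ⟨?_, ?_⟩
    · intro l hl
      obtain ⟨k, _, rfl⟩ :=
        List.mem_map.mp ((@PySem.List.mem_sorted (List Char) (List Char) List.instLinearOrder.toLT LinearOrder.toDecidableLT gs (fun x => x) false l).mp hl)
      exact List.pairwise_replicate.mpr (Or.inr le_rfl)
    · refine (PySem.List.sorted_pairwise gs (fun x => x)).imp_of_mem ?_
      intro g h hg hh hle
      obtain ⟨k1, hk1, rfl⟩ := List.mem_map.mp ((@PySem.List.mem_sorted (List Char) (List Char) List.instLinearOrder.toLT LinearOrder.toDecidableLT gs (fun x => x) false g).mp hg)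
      obtain ⟨k2, hk2, rfl⟩ := List.mem_map.mp ((@PySem.List.mem_sorted (List Char) (List Char) List.instLinearOrder.toLT LinearOrder.toDecidableLT gs (fun x => x) false h).mp hh)
      intro x hx y hy
      rw [List.eq_of_mem_replicate hx, List.eq_of_mem_replicate hy]
      have hle' : List.replicate (min (l1.count k1) (l2.count k1)) k1
          ≤ List.replicate (min (l1.count k2) (l2.count k2)) k2 := hle
      obtain ⟨m1, hm1⟩ := Nat.exists_eq_succ_of_ne_zero (Nat.pos_iff_ne_zero.mp (hpos k1 hk1))
      obtain ⟨m2, hm2⟩ := Nat.exists_eq_succ_of_ne_zero (Nat.pos_iff_ne_zero.mp (hpos k2 hk2))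
      rw [hm1, hm2, List.replicate_succ, List.replicate_succ] at hle'
      exact head_le_of_cons_le hle' 
  -- both sides have count c = min of the two counts
  have hperm : ((@PySem.List.sorted (List Char) (List Char) List.instLinearOrder.toLT
      LinearOrder.toDecidableLT gs (fun x => x) false).flatten).Perm
      (pvMerge (PySem.List.sorted l1 (fun x => x) false)
        (PySem.List.sorted l2 (fun x => x) false)) := by
    refine List.perm_iff_count.mpr ?_
    intro c
    rw [((@PySem.List.sorted_perm (List Char) (List Char) List.instLinearOrder.toLT LinearOrder.toDecidableLT gs (fun x => x) false).flatten).count_eq c]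
    rw [hgs, count_flatten_replicate (fun k => min (l1.count k) (l2.count k)) c ksP hndP]
    rw [pvMerge_count _ _ hs1 hs2 c]
    rw [(PySem.List.sorted_perm l1 (fun x => x) false).count_eq c,
      (PySem.List.sorted_perm l2 (fun x => x) false).count_eq c]
    by_cases hc : c ∈ ksP
    · simp [hc]
    · have hnot : c ∉ l1 ∨ c ∉ l2 := by
        by_contra hcc
        push Not at hcc
        exact hc ((hmemP c).mpr hcc)
      rcases hnot with hnot | hnot <;>
        simp [hc, List.count_eq_zero_of_not_mem hnot]
  exact List.eq_of_perm_of_sorted (fun a b _ _ h1 h2 => le_antisymm h1 h2) hsA hsB hperm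

-- ===== VERDICT (by name: the statement is the Claim_ definition above) =====
theorem commonPermutation_spec : Claim_equal_commonPermutation := by
  intro s1 s2 _
  unfold Spec_commonPermutation
  exact commonPermutation_eq s1 s2
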